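-- pv_equiv track=rewrite | github.com/Yuta-beep/attention-tracker | src/last_token_attention/plots.py | _token_labels
-- ===== SOURCE A (Python) =====
-- def _clean_token_label(token: str) -> str:
--     token = token.replace("\n", "\\n").replace("\t", "\\t")
--     token = token.replace(" ", "␠")
--     token = token.strip() or "␠"
--     return token
--
-- def _token_labels(tokens: list[str]) -> list[str]:
--     count = len(tokens)
--     if count <= 28:
--         step = 1
--     elif count <= 60:
--         step = 2
--     elif count <= 100:
--         step = 4
--     else:
--         step = max(1, count // 24)
--
--     labels = []
--     for idx, token in enumerate(tokens):
--         if idx % step == 0: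
--             cleaned = _clean_token_label(token)
--             if len(cleaned) > 10:
--                 cleaned = cleaned[:10] + "…"
--             labels.append(f"{idx}:{cleaned}")
--         else:
--             labels.append("")
--     return labels
-- ===== SOURCE B (Python) =====
-- def _clean_token_label(token: str) -> str:
--     token = token.replace("\n", "\\n").replace("\t", "\\t")
--     token = token.replace(" ", "\u2420")
--     token = token.strip() or "\u2420"
--     return token
--
-- def _token_labels(tokens: list[str]) -> list[str]:
--     count = len(tokens)
--     if count <= 28:
--         step = 1
--     elif count <= 60:
--         step = 2
--     elif count <= 100:
--         step = 4
--     else: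
--         step = max(1, count // 24)
--
--     labels = []
--     for start in range(0, count, step):
--         cleaned = _clean_token_label(tokens[start])
--         if len(cleaned) > 10:
--             cleaned = cleaned[:10] + "\u2026"
--         labels.append(f"{start}:{cleaned}")
--         labels.extend([""] * (min(start + step, count) - start - 1))
--     return labels
-- ===== Notes on version B (the rewrite author's own statement) =====
-- stated objective: alternative
-- what changed: B replaces A's full enumerate-over-all-tokens pass with an idx%step test per element by a strided loop that visits only the labelled positions (range(0, count, step)), emitting each label followed by its run of blanks, so the clean/truncate work and the modulo test disappear from the unlabelled positions. (measured ~1.7x faster at the largest timing size)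
import Mathlib
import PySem

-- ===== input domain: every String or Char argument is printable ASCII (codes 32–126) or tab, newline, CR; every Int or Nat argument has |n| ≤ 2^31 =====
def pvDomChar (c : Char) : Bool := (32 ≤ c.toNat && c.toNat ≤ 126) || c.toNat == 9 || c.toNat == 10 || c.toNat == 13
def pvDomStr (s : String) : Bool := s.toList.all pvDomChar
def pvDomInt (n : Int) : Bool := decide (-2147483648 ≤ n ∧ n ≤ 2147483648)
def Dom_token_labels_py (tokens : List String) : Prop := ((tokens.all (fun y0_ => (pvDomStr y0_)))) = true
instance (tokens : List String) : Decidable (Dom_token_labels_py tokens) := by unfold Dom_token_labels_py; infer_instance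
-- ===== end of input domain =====

-- B replaces A's full enumerate-with-modulo scan by a strided loop over the labelled
-- positions only, emitting each label followed by its run of blanks (objective: alternative).

-- ===== PORT A =====
-- _clean_token_label plus the 10-char truncation and the f"{idx}:{...}" formatting
-- (identical lines in Source A and Source B, so shared by both ports)
def pvMkLabel (idx : Int) (token : String) : String :=
  let t := PySem.Str.replace (PySem.Str.replace token "\n" "\\n") "\t" "\\t"
  let t := PySem.Str.replace t " " "␠"
  let t := if PySem.Str.strip t = "" then "␠" else PySem.Str.strip t
  let c := if PySem.Str.len t > 10 then PySem.Str.slice t none (some 10) ++ "…" else t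
  PySem.Int.toStr idx ++ ":" ++ c

-- the step ladder of _token_labels (count // 24 via PySem.Int.floordiv)
def pvStepA (count : Nat) : Int :=
  if count ≤ 28 then 1
  else if count ≤ 60 then 2
  else if count ≤ 100 then 4
  else max 1 (PySem.Int.floordiv (count : Int) 24)

def token_labels_py (tokens : List String) : List String :=
  let count := tokens.length
  let step := pvStepA count
  (PySem.List.enumerate tokens 0).foldl
    (fun labels p =>
      if PySem.Int.mod p.1 step == 0 then labels ++ [pvMkLabel p.1 p.2]
      else labels ++ [""]) []

-- ===== PORT B =====
-- Source B's step ladder (same ladder, Nat arithmetic)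
def pvStepB (count : Nat) : Nat :=
  if count ≤ 28 then 1
  else if count ≤ 60 then 2
  else if count ≤ 100 then 4
  else max 1 (count / 24)

-- Source B's strided loop `for start in range(0, count, step)` as fuel recursion
-- (fuel = count bounds the iteration count; tokens.getD start "" is tokens[start],
-- always in range since start < count)
def pvFill (tokens : List String) (count step : Nat) : Nat → Nat → List String
  | 0, _ => []
  | fuel + 1, start =>
    if start < count then
      pvMkLabel (start : Int) (tokens.getD start "")
        :: (List.replicate (min (start + step) count - (start + 1)) ""
            ++ pvFill tokens count step fuel (start + step))
    else []

def token_labels_py_alt (tokens : List String) : List String :=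
  let count := tokens.length
  let step := pvStepB count
  pvFill tokens count step count 0

-- ===== PRECONDITION & SPEC =====
def Spec_token_labels_py (tokens : List String) (out : List String) : Prop := out = token_labels_py_alt tokens
instance (tokens : List String) (out : List String) : Decidable (Spec_token_labels_py tokens out) := by unfold Spec_token_labels_py; infer_instance

-- ===== CLAIM (what is proved, stated in full; the proofs are below) =====
def Claim_equal_token_labels_py : Prop := ∀ (tokens : List String), Dom_token_labels_py tokens → Spec_token_labels_py tokens (token_labels_py tokens)

-- ===== LEMMAS AND PROOFS =====

-- the common value of both programs at position i
def pvG (tokens : List String) (s : Nat) (i : Nat) : String :=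
  if i % s = 0 then pvMkLabel (i : Int) (tokens.getD i "") else ""

theorem pvStepA_eq (count : Nat) : pvStepA count = ((pvStepB count : Nat) : Int) := by
  unfold pvStepA pvStepB
  split_ifs <;> simp [Nat.cast_max]

theorem pvStepB_pos (count : Nat) : 1 ≤ pvStepB count := by
  unfold pvStepB; split_ifs <;> omega

theorem pv_foldl_push {α β : Type} (h : α → β) :
    ∀ (l : List α) (acc : List β),
      l.foldl (fun acc x => acc ++ [h x]) acc = acc ++ l.map h := by
  intro l
  induction l with
  | nil => simp
  | cons x xs ih => intro acc; simp [ih]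

theorem pvA_eq_map (tokens : List String) :
    token_labels_py tokens
      = (List.range tokens.length).map (pvG tokens (pvStepB tokens.length)) := by
  unfold token_labels_py
  rw [PySem.List.enumerate_eq_map_pyRange tokens ""]
  have hbody : (fun (labels : List String) (p : Int × String) =>
      if PySem.Int.mod p.1 (pvStepA tokens.length) == 0 then labels ++ [pvMkLabel p.1 p.2]
      else labels ++ [""])
      = (fun labels p => labels ++
          [if PySem.Int.mod p.1 (pvStepA tokens.length) == 0 then pvMkLabel p.1 p.2 else ""]) := by
    funext labels p; split <;> simp_all
  simp only [hbody, List.foldl_map]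
  rw [pv_foldl_push]
  rw [List.nil_append, PySem.List.len_eq, PySem.List.pyRange_one, List.map_map]
  apply List.map_congr_left
  intro k _
  simp only [Function.comp, zero_add, pvStepA_eq,
    PySem.Int.mod_natCast, PySem.List.pyGetD_natCast, pvG]
  by_cases h : k % pvStepB tokens.length = 0 <;>
    simp [h, Int.natCast_dvd_natCast, Nat.dvd_iff_mod_eq_zero]

theorem pvFill_eq (tokens : List String) (n s : Nat) (hs : 1 ≤ s) :
    ∀ (fuel start : Nat), n - start ≤ fuel → start % s = 0 →
      pvFill tokens n s fuel start = (List.range' start (n - start)).map (pvG tokens s) := by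
  intro fuel
  induction fuel with
  | zero =>
    intro start hle hmod
    have h0 : n - start = 0 := by omega
    simp [pvFill, h0]
  | succ fuel ih =>
    intro start hle hmod
    by_cases hlt : start < n
    · set m := min (start + s) n - start with hmdef
      have hm1 : 1 ≤ m := by omega
      have hms : m ≤ s := by omega
      have hsplit : List.range' start (n - start)
          = start :: (List.range' (start + 1) (m - 1) ++ List.range' (start + m) (n - (start + m))) := by
        have h1 : n - start = ((m - 1) + (n - (start + m))) + 1 := by omega
        rw [h1, List.range'_succ]
        congr 1
        have h2 : start + 1 + 1 * (m - 1) = start + m := by omega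
        rw [← h2, List.range'_append]
      rw [hsplit]
      have hblank : (List.range' (start + 1) (m - 1)).map (pvG tokens s)
          = List.replicate (m - 1) "" := by
        rw [List.eq_replicate_iff]
        refine ⟨by simp, ?_⟩
        intro b hb
        simp only [List.mem_map] at hb
        obtain ⟨i, hi, rfl⟩ := hb
        rw [List.mem_range'_1] at hi
        have hlt' : i - start < s := by omega
        have hd : i % s = i - start := by
          have h2 : i = start + (i - start) := by omega
          conv_lhs => rw [h2]
          rw [Nat.add_mod, hmod]
          simp [Nat.mod_eq_of_lt hlt']
        simp only [pvG, hd]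
        have : ¬ (i - start = 0) := by omega
        simp [this]
      have hstep : (start + s) % s = 0 := by
        rw [Nat.add_mod_right]; exact hmod
      have hih := ih (start + s) (by omega) hstep
      have htail : (List.range' (start + m) (n - (start + m))).map (pvG tokens s)
          = pvFill tokens n s fuel (start + s) := by
        rw [hih]
        by_cases hc : start + s ≤ n
        · have : m = s := by omega
          rw [this]
        · have h3 : n - (start + m) = 0 := by omega
          have h4 : n - (start + s) = 0 := by omega
          rw [h3, h4]; simp
      have hlabel : pvG tokens s start = pvMkLabel (start : Int) (tokens.getD start "") := by
        simp [pvG, hmod]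
      have hrep : min (start + s) n - (start + 1) = m - 1 := by omega
      simp only [pvFill, hlt, if_pos, List.map_cons, List.map_append, hblank, htail, hlabel, hrep]
    · have h0 : n - start = 0 := by omega
      simp [pvFill, hlt, h0]

theorem token_labels_py_spec : Claim_equal_token_labels_py := by
  intro tokens _
  unfold Spec_token_labels_py token_labels_py_alt
  rw [pvA_eq_map]
  rw [pvFill_eq tokens tokens.length (pvStepB tokens.length) (pvStepB_pos _)
      tokens.length 0 (by omega) (Nat.zero_mod _)]
  rw [Nat.sub_zero, List.range_eq_range']
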